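-- pv_equiv track=rewrite | github.com/jkvasagar97/n-gram_multi-thread | assignment-1-22BM6JP52.py | combine_resuts
-- ===== SOURCE A (Python) =====
-- def combine_resuts(pResults):
--     """
--     Reduce function to combine results from several threads
--     """
--     combined_result = {}
--     for _, ngrams in pResults.items():
--         for ngram, score in ngrams.items():
--             if ngram not in combined_result.keys():
--                 combined_result[ngram] = score
--             elif combined_result[ngram] < score:
--                 combined_result[ngram] = score
--     return combined_result
-- ===== SOURCE B (Python) =====
-- def combine_resuts(pResults):
--     """
--     Reduce function to combine results from several threads.
--     Two-pass: collect every score per ngram, then reduce each group with max().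
--     """
--     groups = {}
--     for ngrams in pResults.values():
--         for ngram, score in ngrams.items():
--             groups.setdefault(ngram, []).append(score)
--     return {ngram: max(scores) for ngram, scores in groups.items()}
-- ===== Notes on version B (the rewrite author's own statement) =====
-- stated objective: alternative
-- what changed: B separates collection from reduction: it first groups all scores per ngram into lists (setdefault/append), then builds the result in a second pass with a dict comprehension taking max of each group, instead of A's single pass maintaining a running maximum with compare-and-update branches.
import Mathlib
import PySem

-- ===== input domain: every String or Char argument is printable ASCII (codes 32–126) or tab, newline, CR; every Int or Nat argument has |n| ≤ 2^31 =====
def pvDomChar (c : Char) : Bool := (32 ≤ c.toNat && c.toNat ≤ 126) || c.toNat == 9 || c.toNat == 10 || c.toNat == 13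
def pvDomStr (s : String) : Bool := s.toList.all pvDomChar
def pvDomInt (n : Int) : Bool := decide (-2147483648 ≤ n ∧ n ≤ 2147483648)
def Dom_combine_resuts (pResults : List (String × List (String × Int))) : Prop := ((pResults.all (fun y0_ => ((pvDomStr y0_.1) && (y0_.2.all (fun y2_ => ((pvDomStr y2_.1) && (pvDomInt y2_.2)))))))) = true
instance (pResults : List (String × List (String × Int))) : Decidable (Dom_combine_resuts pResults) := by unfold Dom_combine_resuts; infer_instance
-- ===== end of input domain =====

-- B groups all scores per ngram first, then takes max of each group; A keeps a running max in one pass.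

-- ===== PORT A =====
-- one step of A's inner loop: the branch chain on (ngram, score)
def combineStep (d : PySem.Dict String Int) (p : String × Int) : PySem.Dict String Int :=
  if d.contains p.1 = false then d.insert p.1 p.2          -- if ngram not in combined_result.keys()
  else if d.getD p.1 0 < p.2 then d.insert p.1 p.2         -- elif combined_result[ngram] < score  (key present, so getD's 0 is never used)
  else d

def combine_resuts (pResults : List (String × List (String × Int))) : List (String × Int) :=
  (pResults.foldl (fun d pr => pr.2.foldl combineStep d) PySem.Dict.empty).items

-- ===== PORT B =====
-- groups.setdefault(ngram, []).append(score)  ≡  groups[ngram] = groups.get(ngram, []) + [score]  = Dict.modify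
def groupStep (g : PySem.Dict String (List Int)) (p : String × Int) : PySem.Dict String (List Int) :=
  g.modify p.1 [] (· ++ [p.2])

def combine_resuts_alt (pResults : List (String × List (String × Int))) : List (String × Int) :=
  let groups := pResults.foldl (fun g pr => pr.2.foldl groupStep g) PySem.Dict.empty
  -- {ngram: max(scores) …}: every group is nonempty, so Python's max never raises; .getD 0 is unreachable
  groups.items.map (fun kv => (kv.1, (PySem.List.max? kv.2 id).getD 0))

-- ===== PRECONDITION & SPEC =====
def Spec_combine_resuts (pResults : List (String × List (String × Int))) (out : List (String × Int)) : Prop := out = combine_resuts_alt pResults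
instance (pResults : List (String × List (String × Int))) (out : List (String × Int)) : Decidable (Spec_combine_resuts pResults out) := by unfold Spec_combine_resuts; infer_instance

-- ===== CLAIM (what is proved, stated in full; the proofs are below) =====
def Claim_equal_combine_resuts : Prop := ∀ (pResults : List (String × List (String × Int))), Dom_combine_resuts pResults → Spec_combine_resuts pResults (combine_resuts pResults)

-- ===== LEMMAS AND PROOFS =====

-- reduce a group dict to A's running-max dict
def pvRed (g : PySem.Dict String (List Int)) : PySem.Dict String Int :=
  PySem.Dict.mk (g.items.map (fun kv => (kv.1, (PySem.List.max? kv.2 id).getD 0)))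

def pvMaxD (l : List Int) : Int := (PySem.List.max? l id).getD 0

lemma max?_cons_isSome (t : List Int) : ∀ (a : Int), (PySem.List.max? (a :: t) id).isSome := by
  induction t with
  | nil => intro a; rfl
  | cons b t ih =>
    intro a
    by_cases h : (a : Int) < b
    · have he : PySem.List.max? (a :: b :: t) id = PySem.List.max? (b :: t) id := by
        simp [PySem.List.max?, h]
      rw [he]; exact ih b
    · have he : PySem.List.max? (a :: b :: t) id = PySem.List.max? (a :: t) id := by
        simp [PySem.List.max?, h]
      rw [he]; exact ih a

lemma max?_isSome_of_ne_nil (l : List Int) (h : l ≠ []) : (PySem.List.max? l id).isSome := by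
  cases l with
  | nil => exact absurd rfl h
  | cons a t => exact max?_cons_isSome t a

lemma maxD_append_singleton (l : List Int) (s : Int) (h : l ≠ []) :
    pvMaxD (l ++ [s]) = if pvMaxD l < s then s else pvMaxD l := by
  obtain ⟨m, hm⟩ := Option.isSome_iff_exists.mp (max?_isSome_of_ne_nil l h)
  unfold pvMaxD
  simp only [PySem.List.max?, List.foldl_append] at hm ⊢
  rw [hm]
  simp only [Option.getD_some]
  show (if m < s then (some s : Option Int) else some m).getD 0 = if m < s then s else m
  split_ifs <;> rfl

lemma red_keys (g : PySem.Dict String (List Int)) : (pvRed g).keys = g.keys := by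
  simp [pvRed, PySem.Dict.keys, List.map_map, Function.comp_def]

lemma red_contains (g : PySem.Dict String (List Int)) (k : String) :
    (pvRed g).contains k = g.contains k := by
  simp [pvRed, PySem.Dict.contains, List.any_map, Function.comp_def]

lemma step_red (g : PySem.Dict String (List Int)) (hnd : g.keys.Nodup)
    (hne : ∀ kv ∈ g.items, kv.2 ≠ []) (p : String × Int) :
    pvRed (groupStep g p) = combineStep (pvRed g) p := by
  obtain ⟨k, s⟩ := p
  unfold groupStep combineStep PySem.Dict.modify
  by_cases hc : g.contains k = true
  · -- the key is already present
    obtain ⟨old, hold⟩ : ∃ v, g.get? k = some v := by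
      have := PySem.Dict.contains_eq_isSome_get? (d := g) (k := k)
      rw [hc] at this
      exact Option.isSome_iff_exists.mp this.symm
    have hgetD : g.getD k [] = old := PySem.Dict.getD_of_get?_eq_some g [] hold
    have hmem : (k, old) ∈ g.items := PySem.Dict.mem_items_of_get?_eq_some g hold
    have holdne : old ≠ [] := hne _ hmem
    have hrednd : (pvRed g).keys.Nodup := by rw [red_keys]; exact hnd
    have hredmem : (k, pvMaxD old) ∈ (pvRed g).items := by
      simpa [pvRed, pvMaxD] using List.mem_map_of_mem hmem
        (f := fun kv => (kv.1, (PySem.List.max? kv.2 id).getD 0))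
    have hredc : (pvRed g).contains k = true := by rw [red_contains]; exact hc
    have hredD : (pvRed g).getD k 0 = pvMaxD old :=
      PySem.Dict.getD_of_mem_items _ hredmem hrednd 0
    rw [hredc, hgetD]
    simp only [Bool.true_eq_false, if_false, hredD]
    have hval : ∀ q ∈ g.items, q.1 = k → q.2 = old := by
      intro q hq hqk
      have := PySem.Dict.get?_of_mem_items g hq hnd
      rw [hqk, hold] at this
      exact ((Option.some.injEq _ _).mp this).symm
    by_cases hlt : pvMaxD old < s
    · rw [if_pos hlt]
      apply PySem.Dict.ext
      show List.map (fun kv => (kv.1, (PySem.List.max? kv.2 id).getD 0))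
          ((g.insert k (old ++ [s])).items) = ((pvRed g).insert k s).items
      rw [PySem.Dict.items_insert_of_contains _ _ hc,
          PySem.Dict.items_insert_of_contains _ _ hredc]
      show List.map _ (List.map _ g.items)
        = List.map _ (List.map _ g.items)
      rw [List.map_map, List.map_map]
      refine List.map_congr_left ?_
      intro q hq
      simp only [Function.comp_apply]
      by_cases hqk : (q.1 == k) = true
      · have hk : q.1 = k := by simpa using hqk
        have hms : (PySem.List.max? (old ++ [s]) id).getD 0 = s := by
          have h2 := maxD_append_singleton old s holdne
          rw [if_pos hlt] at h2
          simpa [pvMaxD] using h2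
        simp [hk, hms]
      · rw [Bool.not_eq_true] at hqk
        simp [hqk]
    · rw [if_neg hlt]
      apply PySem.Dict.ext
      show List.map (fun kv => (kv.1, (PySem.List.max? kv.2 id).getD 0))
          ((g.insert k (old ++ [s])).items) = (pvRed g).items
      rw [PySem.Dict.items_insert_of_contains _ _ hc]
      show List.map _ (List.map _ g.items) = List.map _ g.items
      rw [List.map_map]
      refine List.map_congr_left ?_
      intro q hq
      simp only [Function.comp_apply]
      by_cases hqk : (q.1 == k) = true
      · have hk : q.1 = k := by simpa using hqk
        have hq2 : q.2 = old := hval q hq hk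
        have hms : (PySem.List.max? (old ++ [s]) id).getD 0
            = (PySem.List.max? old id).getD 0 := by
          have h2 := maxD_append_singleton old s holdne
          rw [if_neg hlt] at h2
          simpa [pvMaxD] using h2
        simp [hk, hq2, hms]
      · rw [Bool.not_eq_true] at hqk
        simp [hqk]
  · -- fresh key
    have hc' : g.contains k = false := by simpa using hc
    have hredc : (pvRed g).contains k = false := by rw [red_contains]; exact hc'
    rw [hredc]
    simp only [if_true]
    rw [PySem.Dict.getD_of_not_contains g [] hc']
    apply PySem.Dict.ext
    rw [PySem.Dict.items_insert_of_not_contains _ _ hredc]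
    show List.map _ ((g.insert k ([] ++ [s])).items) = List.map _ g.items ++ [(k, s)]
    rw [PySem.Dict.items_insert_of_not_contains _ _ hc']
    simp [PySem.List.max?]

lemma main_inv (L : List (String × Int)) :
    ∀ (g : PySem.Dict String (List Int)), g.keys.Nodup → (∀ kv ∈ g.items, kv.2 ≠ []) →
    L.foldl combineStep (pvRed g) = pvRed (L.foldl groupStep g) := by
  induction L with
  | nil => intro g _ _; rfl
  | cons p t ih =>
    intro g hnd hne
    simp only [List.foldl_cons]
    rw [← step_red g hnd hne p]
    refine ih (groupStep g p) ?_ ?_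
    · unfold groupStep PySem.Dict.modify
      exact PySem.Dict.nodup_keys_insert g _ _ hnd
    · intro kv hkv
      unfold groupStep PySem.Dict.modify at hkv
      rcases (PySem.Dict.mem_items_insert _ _ _ _).mp hkv with h | h
      · subst h; simp
      · exact hne _ h.1

lemma flatten_foldl {σ : Type} (f : σ → String × Int → σ)
    (pResults : List (String × List (String × Int))) (init : σ) :
    pResults.foldl (fun d pr => pr.2.foldl f d) init
      = (pResults.flatMap (·.2)).foldl f init := by
  induction pResults generalizing init with
  | nil => rfl
  | cons h t ih => simp [List.flatMap_cons, List.foldl_append, ih]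

-- ===== VERDICT (by name: the statement is the Claim_ definition above) =====
theorem combine_resuts_spec : Claim_equal_combine_resuts := by
  intro pResults _
  unfold Spec_combine_resuts combine_resuts combine_resuts_alt
  rw [flatten_foldl, flatten_foldl]
  rw [show (PySem.Dict.empty : PySem.Dict String Int) = pvRed PySem.Dict.empty from rfl]
  rw [main_inv _ PySem.Dict.empty (by simp [PySem.Dict.empty, PySem.Dict.keys]) (by simp [PySem.Dict.empty])]
  rfl
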